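-- pv_equiv track=rewrite | github.com/dhoppenb/AoC-2024 | day_4/solve_1.py | diag_flatten
-- ===== SOURCE A (Python) =====
-- def diag_flatten(matrix: list[list]) -> list:
--     num_rows: int = len(matrix)
--     num_cols: int = len(matrix[0])
--     result = []
--     for line in range(1, num_rows + num_cols):
--         start_col = max(0, line-num_rows)
--         count = min(line, (num_cols - start_col), num_rows)
--         sublist = []
--         for j in range(0, count):
--             sublist.append(matrix[min(num_rows, line) - j - 1][start_col + j])
--         result.append(sublist)
--     return result
-- ===== SOURCE B (Python) =====
-- def diag_flatten(matrix: list[list]) -> list: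
--     num_rows = len(matrix)
--     num_cols = len(matrix[0])
--     result = [[] for _ in range(num_rows + num_cols - 1)]
--     for i in range(num_rows - 1, -1, -1):
--         for j in range(num_cols):
--             result[i + j].append(matrix[i][j])
--     return result
-- ===== Notes on version B (the rewrite author's own statement) =====
-- stated objective: simpler
-- what changed: Replaces A's per-diagonal start_col/count/min-max index arithmetic with a single cell-major pass that scatters each matrix[i][j] into bucket i+j of a preallocated list, iterating rows bottom-up to keep A's within-diagonal order.
import Mathlib
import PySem

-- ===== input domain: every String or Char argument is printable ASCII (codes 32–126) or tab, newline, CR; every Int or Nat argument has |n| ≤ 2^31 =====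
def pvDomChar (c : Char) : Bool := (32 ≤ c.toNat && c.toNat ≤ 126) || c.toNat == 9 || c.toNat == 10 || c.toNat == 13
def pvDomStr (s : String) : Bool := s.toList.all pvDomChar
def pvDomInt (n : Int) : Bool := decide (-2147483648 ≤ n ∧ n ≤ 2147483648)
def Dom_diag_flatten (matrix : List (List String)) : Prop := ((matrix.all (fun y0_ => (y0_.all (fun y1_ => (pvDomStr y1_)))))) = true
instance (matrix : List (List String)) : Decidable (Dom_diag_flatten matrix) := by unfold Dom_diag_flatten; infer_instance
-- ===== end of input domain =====

-- B replaces A's per-diagonal index arithmetic by one cell-major pass scattering each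
-- matrix cell into its anti-diagonal bucket (objective: simpler; same O(R*C) cost).

-- ===== PORT A =====
-- Literal port of A.  Indexing uses pyGetD (default), exact under Pre_diag_flatten,
-- which admits exactly the inputs on which the Python A returns (no IndexError).
def diag_flatten (matrix : List (List String)) : List (List String) :=
  let num_rows : Int := matrix.length
  let num_cols : Int := ((PySem.List.pyGet? matrix 0).getD []).length
  (PySem.List.pyRange 1 (num_rows + num_cols) 1).foldl (fun result line =>
    let start_col : Int := max 0 (line - num_rows)
    let count : Int := min (min line (num_cols - start_col)) num_rows
    let sublist := (PySem.List.pyRange 0 count 1).foldl (fun sublist j =>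
      sublist ++ [PySem.List.pyGetD (PySem.List.pyGetD matrix (min num_rows line - j - 1) [])
                    (start_col + j) ""]) []
    result ++ [sublist]) []

-- ===== PORT B =====
-- Literal port of Source B: buckets result[i+j]; i+j ≥ 0 inside the loops, so .toNat is exact.
def diag_flatten_alt (matrix : List (List String)) : List (List String) :=
  let num_rows : Int := matrix.length
  let num_cols : Int := ((PySem.List.pyGet? matrix 0).getD []).length
  let result : List (List String) := List.replicate (num_rows + num_cols - 1).toNat []
  (PySem.List.pyRange (num_rows - 1) (-1) (-1)).foldl (fun result i =>
    (PySem.List.pyRange 0 num_cols 1).foldl (fun result j =>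
      result.modify (i + j).toNat
        (fun b => b ++ [PySem.List.pyGetD (PySem.List.pyGetD matrix i []) j ""])) result) result

-- ===== PRECONDITION & SPEC =====
-- Pre_ = exactly the inputs on which Python A returns: A raises IndexError on the empty
-- matrix (matrix[0]) and whenever some row is shorter than row 0 (both ports' pyGetD
-- defaults are never hit inside Pre_); Python B raises on exactly the same inputs.
def Pre_diag_flatten (matrix : List (List String)) : Prop :=
  matrix ≠ [] ∧ ∀ row ∈ matrix, (matrix.headD []).length ≤ row.length
instance (matrix : List (List String)) : Decidable (Pre_diag_flatten matrix) := by
  unfold Pre_diag_flatten; infer_instance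
def pvWitness_diag_flatten : List (List String) := [["a", "b"], ["c", "d"]]

def Spec_diag_flatten (matrix : List (List String)) (out : List (List String)) : Prop := out = diag_flatten_alt matrix
instance (matrix : List (List String)) (out : List (List String)) : Decidable (Spec_diag_flatten matrix out) := by unfold Spec_diag_flatten; infer_instance

-- ===== CLAIM (what is proved, stated in full; the proofs are below) =====
def Claim_equal_diag_flatten : Prop := ∀ (matrix : List (List String)), Dom_diag_flatten matrix → Pre_diag_flatten matrix → Spec_diag_flatten matrix (diag_flatten matrix)

-- ===== LEMMAS AND PROOFS =====

-- The cell both programs read at row i, column j (total form; in range under Pre_).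
def pvCell (matrix : List (List String)) (i j : Nat) : String :=
  (matrix.getD i []).getD j ""

-- The common value of bucket d: rows hi, hi-1, …, hi-cnt+1 of the d-th anti-diagonal.
def pvDiag (matrix : List (List String)) (R C d : Nat) : List String :=
  (List.range (min d (R - 1) + 1 - (d + 1 - C))).map
    (fun j => pvCell matrix (min d (R - 1) - j) (d - (min d (R - 1) - j)))

-- B's inner loop over j, in Nat form.
def pvRowStep (matrix : List (List String)) (C : Nat) (s : List (List String)) (i : Nat) :
    List (List String) :=
  (List.range C).foldl (fun s j => s.modify (i + j) (fun b => b ++ [pvCell matrix i j])) s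

theorem pvRowStep_getElem? (matrix : List (List String)) (C : Nat) (i : Nat) :
    ∀ (s : List (List String)) (d : Nat),
      (pvRowStep matrix C s i)[d]? =
        s[d]?.map (fun b => if i ≤ d ∧ d < i + C then b ++ [pvCell matrix i (d - i)] else b) := by
  induction C with
  | zero =>
    intro s d
    simp [pvRowStep]
    cases s[d]? with
    | none => rfl
    | some b => simp
  | succ C ih =>
    intro s d
    unfold pvRowStep at *
    rw [List.range_succ, List.foldl_append]
    simp only [List.foldl_cons, List.foldl_nil]
    rw [List.getElem?_modify, ih]
    cases s[d]? with
    | none => rfl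
    | some b =>
      by_cases h : i + C = d
      · simp only [Option.map_some, Option.map_eq_map, if_pos h]
        have h1 : ¬ (i ≤ d ∧ d < i + C) := by omega
        have h2 : i ≤ d ∧ d < i + (C + 1) := by omega
        simp [← h]
      · simp only [Option.map_some, Option.map_eq_map, if_neg h]
        have : (i ≤ d ∧ d < i + C) ↔ (i ≤ d ∧ d < i + (C + 1)) := by omega
        simp [this]

theorem pv_foldl_rowStep_getElem? (matrix : List (List String)) (C : Nat) :
    ∀ (rows : List Nat) (s : List (List String)) (d : Nat),
      (rows.foldl (pvRowStep matrix C) s)[d]? =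
        s[d]?.map (fun b => b ++ rows.filterMap
          (fun i => if i ≤ d ∧ d < i + C then some (pvCell matrix i (d - i)) else none)) := by
  intro rows
  induction rows with
  | nil =>
    intro s d; cases h : s[d]? <;> simp [h]
  | cons i rows ih =>
    intro s d
    rw [List.foldl_cons, ih, pvRowStep_getElem?]
    cases s[d]? with
    | none => rfl
    | some b =>
      simp only [Option.map_some, List.filterMap_cons]
      by_cases h : i ≤ d ∧ d < i + C
      · simp [h]
      · simp [h]

-- ascending filterMap over range n with an interval condition is a contiguous range'
theorem pv_filterMap_range_interval {β : Type} (g : Nat → β) (a b : Nat) :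
    ∀ n : Nat, (List.range n).filterMap
        (fun i => if a ≤ i ∧ i ≤ b then some (g i) else none) =
      (List.range' a (min (b + 1) n - a)).map g := by
  intro n
  induction n with
  | zero => simp
  | succ n ih =>
    rw [List.range_succ, List.filterMap_append, ih]
    by_cases h : a ≤ n ∧ n ≤ b
    · have h1 : min (b + 1) (n + 1) - a = (min (b + 1) n - a) + 1 := by omega
      have h2 : a + 1 * (min (b + 1) n - a) = n := by omega
      rw [h1, List.range'_concat, h2]
      simp [h]
    · rw [show min (b + 1) (n + 1) - a = min (b + 1) n - a by omega]
      simp only [List.filterMap_cons, List.filterMap_nil, if_neg h, List.append_nil]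

theorem pv_min_add (R C d : Nat) (hR : 1 ≤ R) :
    min (d + 1) R - (d + 1 - C) = min d (R - 1) + 1 - (d + 1 - C) := by omega

-- B's final bucket d equals pvDiag
theorem pv_bucket_eq_diag (matrix : List (List String)) (R C d : Nat) (hR : 1 ≤ R) :
    ((List.range R).reverse.filterMap
        (fun i => if i ≤ d ∧ d < i + C then some (pvCell matrix i (d - i)) else none)) =
      pvDiag matrix R C d := by
  rw [List.filterMap_reverse]
  have hcond : ∀ i : Nat, (i ≤ d ∧ d < i + C) ↔ (d + 1 - C ≤ i ∧ i ≤ d) := by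
    intro i; omega
  have : (fun i => if i ≤ d ∧ d < i + C then some (pvCell matrix i (d - i)) else none)
      = (fun i => if d + 1 - C ≤ i ∧ i ≤ d then some (pvCell matrix i (d - i)) else none) := by
    funext i; simp [hcond i]
  rw [this, pv_filterMap_range_interval (fun i => pvCell matrix i (d - i)) (d + 1 - C) d R]
  rw [← List.map_reverse, List.reverse_range', List.map_map, pvDiag,
      pv_min_add R C d hR]
  apply List.map_congr_left
  intro j hj
  simp only [List.mem_range] at hj
  simp only [Function.comp]
  have e : d + 1 - C + (min d (R - 1) + 1 - (d + 1 - C)) - 1 - j = min d (R - 1) - j := by omega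
  rw [e]

-- ===== the two ports as maps over range (R+C-1) =====

theorem pv_altB (matrix : List (List String)) (hR : 1 ≤ matrix.length) :
    diag_flatten_alt matrix =
      (List.range (matrix.length + ((PySem.List.pyGet? matrix 0).getD []).length - 1)).map
        (fun d => pvDiag matrix matrix.length ((PySem.List.pyGet? matrix 0).getD []).length d) := by
  set R : Nat := matrix.length with hRdef
  set C : Nat := ((PySem.List.pyGet? matrix 0).getD []).length with hCdef
  -- rewrite B's fold into the Nat-level fold
  have hrows : PySem.List.pyRange ((R : Int) - 1) (-1) (-1)
      = ((List.range R).reverse).map (fun (i : Nat) => (i : Int)) := by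
    rw [PySem.List.pyRange_neg_one]
    have : ((R : Int) - 1 - (-1)).toNat = R := by omega
    rw [this]
    conv_rhs => rw [List.range_eq_range', List.reverse_range', List.map_map]
    apply List.map_congr_left
    intro k hk
    simp only [List.mem_range] at hk
    simp only [Function.comp]
    omega
  have hinner : ∀ (i : Nat) (s : List (List String)),
      (PySem.List.pyRange 0 (C : Int) 1).foldl (fun result j =>
        result.modify ((i : Int) + j).toNat
          (fun b => b ++ [PySem.List.pyGetD (PySem.List.pyGetD matrix (i : Int) []) j ""])) s
      = pvRowStep matrix C s i := by
    intro i s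
    rw [PySem.List.pyRange_one]
    have : ((C : Int) - 0).toNat = C := by omega
    rw [this, List.foldl_map]
    unfold pvRowStep
    apply List.foldl_ext
    intro acc j hj
    simp only [List.mem_range] at hj
    have h1 : ((i : Int) + (0 + (j : Int))).toNat = i + j := by omega
    rw [h1]
    congr 1
    funext b
    rw [show (0 : Int) + (j : Int) = ((j : Nat) : Int) by omega,
        PySem.List.pyGetD_natCast, PySem.List.pyGetD_natCast]
    rfl
  have hfold : diag_flatten_alt matrix
      = ((List.range R).reverse).foldl (pvRowStep matrix C)
          (List.replicate (((R : Int) + (C : Int) - 1).toNat) []) := by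
    simp only [diag_flatten_alt, ← hRdef, ← hCdef]
    rw [hrows, List.foldl_map]
    apply List.foldl_ext
    intro acc i hi
    exact hinner i acc
  have hlen1 : (((R : Int) + (C : Int) - 1)).toNat = R + C - 1 := by omega
  rw [hfold, hlen1]
  apply List.ext_getElem?
  intro d
  rw [pv_foldl_rowStep_getElem?]
  by_cases hd : d < R + C - 1
  · rw [List.getElem?_map, List.getElem?_range hd,
        List.getElem?_replicate, if_pos hd]
    simp only [Option.map_some, List.nil_append]
    rw [pv_bucket_eq_diag matrix R C d hR]
  · have h1 : (List.replicate (R + C - 1) ([] : List String))[d]? = none := by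
      rw [List.getElem?_eq_none_iff]; simp; omega
    have h2 : ((List.range (R + C - 1)).map (fun d => pvDiag matrix R C d))[d]? = none := by
      rw [List.getElem?_eq_none_iff]; simp; omega
    rw [h1, h2]; rfl

theorem pv_A (matrix : List (List String)) (hR : 1 ≤ matrix.length) :
    diag_flatten matrix =
      (List.range (matrix.length + ((PySem.List.pyGet? matrix 0).getD []).length - 1)).map
        (fun d => pvDiag matrix matrix.length ((PySem.List.pyGet? matrix 0).getD []).length d) := by
  set R : Nat := matrix.length with hRdef
  set C : Nat := ((PySem.List.pyGet? matrix 0).getD []).length with hCdef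
  simp only [diag_flatten, ← hRdef, ← hCdef]
  rw [PySem.List.foldl_append_singleton_eq_map, List.nil_append,
      PySem.List.pyRange_one 1 ((R : Int) + (C : Int)),
      show (((R : Int) + (C : Int)) - 1).toNat = R + C - 1 by omega,
      List.map_map]
  apply List.map_congr_left
  intro d hd
  simp only [List.mem_range] at hd
  simp only [Function.comp]
  rw [PySem.List.foldl_append_singleton_eq_map, List.nil_append,
      PySem.List.pyRange_one 0 _, List.map_map]
  have hcnt : ((min (min (1 + (d : Int)) ((C : Int) - max 0 (1 + (d : Int) - (R : Int)))) (R : Int)) - 0).toNat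
      = min d (R - 1) + 1 - (d + 1 - C) := by omega
  rw [hcnt]
  unfold pvDiag
  apply List.map_congr_left
  intro j hj
  simp only [List.mem_range] at hj
  simp only [Function.comp]
  have e1 : min (R : Int) (1 + (d : Int)) - (0 + (j : Int)) - 1
      = ((min d (R - 1) - j : Nat) : Int) := by omega
  have e2 : max 0 (1 + (d : Int) - (R : Int)) + (0 + (j : Int))
      = ((d - (min d (R - 1) - j) : Nat) : Int) := by omega
  rw [e1, e2, PySem.List.pyGetD_natCast, PySem.List.pyGetD_natCast]
  rfl

-- ===== VERDICT (by name: the statement is the Claim_ definition above) =====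
theorem diag_flatten_spec : Claim_equal_diag_flatten := by
  intro matrix _hdom hpre
  unfold Spec_diag_flatten
  obtain ⟨hne, hrect⟩ := hpre
  have hR : 1 ≤ matrix.length := by
    cases matrix with
    | nil => exact absurd rfl hne
    | cons a l => simp
  rw [pv_A matrix hR, pv_altB matrix hR]
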